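-- pv_equiv track=rewrite | github.com/DedRobin/codewars | Python/4pyu/Description.py | solution
-- ===== SOURCE A (Python) =====
-- def solution(array):
--     the_same=len(set(array))
--     while the_same!=1:
--         array.sort()
--         max_from_the_array=max(array)
--         index=array.index(max_from_the_array)
--         array[index]=array[index]-array[index-1]
--         the_same=len(set(array))
--     return sum(array)
-- ===== SOURCE B (Python) =====
-- def solution(array):
--     g = 0
--     for x in array:
--         while x:
--             g, x = x, g % x
--     return len(array) * g
-- ===== Notes on version B (the rewrite author's own statement) =====
-- stated objective: alternative
-- what changed: A repeatedly sorts the array and subtracts the previous element from the first maximum until all values are equal; B computes the same fixpoint directly as len(array) * gcd(array) with a single Euclidean-gcd fold, no sorting and no repeated passes (intended as faster; a timing run could not measure a ratio because A does not finish on the random timing inputs).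
-- outside the precondition, e.g. on solution([]): A raises ValueError, B returns 0; on solution([0, 1]): A does not finish within the time limit, B returns 2; on solution([-1, 2]): A does not finish within the time limit, B returns 2
import Mathlib
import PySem

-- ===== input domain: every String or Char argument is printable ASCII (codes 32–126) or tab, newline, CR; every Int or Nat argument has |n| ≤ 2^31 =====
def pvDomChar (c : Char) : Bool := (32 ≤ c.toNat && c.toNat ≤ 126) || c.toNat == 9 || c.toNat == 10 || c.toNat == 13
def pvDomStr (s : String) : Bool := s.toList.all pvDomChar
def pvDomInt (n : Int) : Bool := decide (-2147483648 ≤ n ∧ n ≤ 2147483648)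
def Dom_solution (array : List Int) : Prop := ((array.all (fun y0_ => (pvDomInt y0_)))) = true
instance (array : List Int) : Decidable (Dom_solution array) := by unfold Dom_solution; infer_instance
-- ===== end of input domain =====

-- B replaces A's repeated sort/subtract loop by a single Euclidean-gcd pass: the loop's fixpoint
-- is len(array) * gcd(array) (intended as faster; a timing run could not compare the two,
-- since A does not finish on its random input family). A sorts and mutates its argument in place;
-- the equivalence proved here is about the RETURN value only (B does not mutate).

-- ===== PORT A =====
-- the while-loop of A; the Nat argument is a fuel bound used only to make the recursion total
-- (under Pre_ the loop terminates well before the fuel runs out, see lemma solutionLoop_eq below)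
def solutionLoop : Nat → List Int → Int
  | fuel, l =>
    if (PySem.Set.ofList l).length = 1 then l.sum   -- while len(set(array)) != 1 — exit: return sum(array)
    else
      match fuel with
      | 0 => l.sum                                   -- fuel exhausted (unreachable under Pre_solution)
      | f + 1 =>
        let s := PySem.List.sorted l (fun x => x) false              -- array.sort()
        match PySem.List.max? s (fun x => x) with                    -- max(array); ValueError on []
        | none => 0                                                  -- Python raises here (outside Pre_)
        | some m =>
          match PySem.List.index? s m with                           -- array.index(max_…)
          | none => 0                                                -- unreachable: m ∈ s
          | some i =>
            match PySem.List.pyGet? s (i : Int), PySem.List.pyGet? s ((i : Int) - 1) with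
            | some a, some b => solutionLoop f (s.set i (a - b))     -- array[index] = array[index] - array[index-1]
            | _, _ => 0                                              -- unreachable: 0 ≤ i < len

def solution (array : List Int) : Int := solutionLoop (array.sum.toNat + 1) array

-- ===== PORT B =====
-- inner 'while x: g, x = x, g % x' of Source B (Python '%' = PySem.Int.mod)
def euclid (g x : Int) : Int :=
  if _h0 : x = 0 then g else euclid x (PySem.Int.mod g x)
termination_by x.natAbs
decreasing_by
  rcases lt_or_gt_of_ne _h0 with hx | hx
  · have h1 := (PySem.Int.mod_neg_bounds g hx).1
    have h2 := (PySem.Int.mod_neg_bounds g hx).2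
    omega
  · have h1 := PySem.Int.mod_nonneg g hx
    have h2 := PySem.Int.mod_lt g hx
    omega

def solution_alt (array : List Int) : Int :=
  (array.length : Int) * array.foldl (fun g x => euclid g x) 0

-- ===== PRECONDITION & SPEC =====
-- Pre_ excludes the empty list (max of an empty sequence: ValueError) and every list that has a
-- non-positive element without being constant: on those A never reaches a single distinct value and
-- loops forever (e.g. [0, 1] or [-1, 2]), so it returns nothing to match.
def Pre_solution (array : List Int) : Prop :=
  array ≠ [] ∧ ((∀ x ∈ array, 0 < x) ∨ (∀ x ∈ array, x = array.headD 0))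
instance (array : List Int) : Decidable (Pre_solution array) := by unfold Pre_solution; infer_instance
def pvWitness_solution : List Int := ([6, 9, 21] : List Int)
def Spec_solution (array : List Int) (out : Int) : Prop := out = solution_alt array
instance (array : List Int) (out : Int) : Decidable (Spec_solution array out) := by unfold Spec_solution; infer_instance

-- ===== CLAIM (what is proved, stated in full; the proofs are below) =====
def Claim_equal_solution : Prop := ∀ (array : List Int), Dom_solution array → Pre_solution array → Spec_solution array (solution array)

-- ===== LEMMAS AND PROOFS =====

-- gcd of a list, as a nonnegative integer
def gcdL (l : List Int) : Int := l.foldr (fun x g => (Int.gcd x g : Int)) 0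

lemma gcdL_cons (x : Int) (t : List Int) : gcdL (x :: t) = (Int.gcd x (gcdL t) : Int) := rfl

lemma gcdL_nonneg (l : List Int) : 0 ≤ gcdL l := by
  cases l with
  | nil => simp [gcdL]
  | cons x t => rw [gcdL_cons]; positivity

lemma gcdL_dvd (l : List Int) : ∀ x ∈ l, gcdL l ∣ x := by
  induction l with
  | nil => simp
  | cons y t ih =>
    intro x hx
    rcases List.mem_cons.1 hx with rfl | hx
    · rw [gcdL_cons]; exact Int.gcd_dvd_left ..
    · rw [gcdL_cons]; exact dvd_trans (Int.gcd_dvd_right ..) (ih x hx)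

lemma dvd_gcdL (l : List Int) (d : Int) (h : ∀ x ∈ l, d ∣ x) : d ∣ gcdL l := by
  induction l with
  | nil => simp [gcdL]
  | cons y t ih =>
    rw [gcdL_cons, Int.coe_gcd]
    exact dvd_gcd (h y (by simp)) (ih (fun x hx => h x (List.mem_cons_of_mem _ hx)))

lemma gcdL_congr (l l' : List Int) (h : ∀ x, x ∈ l ↔ x ∈ l') : gcdL l = gcdL l' := by
  refine Int.dvd_antisymm (gcdL_nonneg l) (gcdL_nonneg l') ?_ ?_
  · exact dvd_gcdL l' _ (fun x hx => gcdL_dvd l x ((h x).2 hx))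
  · exact dvd_gcdL l _ (fun x hx => gcdL_dvd l' x ((h x).1 hx))

-- gcd is invariant under replacing l[i] by l[i] - l[i-1]
lemma gcdL_set_sub (s : List Int) (i : Nat) (hi : i < s.length) (h1 : 1 ≤ i) :
    gcdL (s.set i (s[i] - s[i - 1]'(by omega))) = gcdL s := by
  set b := s[i - 1]'(by omega) with hb
  set v := s[i] - b with hv
  have hib : i ≠ i - 1 := by omega
  have hmemb : b ∈ s.set i v :=
    List.mem_iff_getElem.2 ⟨i - 1, by simp; omega,
      by rw [List.getElem_set_ne hib]⟩
  have hmemv : v ∈ s.set i v :=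
    List.mem_iff_getElem.2 ⟨i, by simp; omega, by rw [List.getElem_set_self]⟩
  refine Int.dvd_antisymm (gcdL_nonneg _) (gcdL_nonneg _) ?_ ?_
  · -- gcdL (set) divides every element of s
    refine dvd_gcdL _ _ ?_
    intro x hx
    rcases List.mem_iff_getElem.1 hx with ⟨j, hj, rfl⟩
    by_cases hji : j = i
    · subst hji
      have hdv : gcdL (s.set j v) ∣ v := gcdL_dvd _ _ hmemv
      have hdb : gcdL (s.set j v) ∣ b := gcdL_dvd _ _ hmemb
      have hjv : s[j] = v + b := by rw [hv]; ring
      rw [hjv]; exact dvd_add hdv hdb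
    · have hx' : s[j] ∈ s.set i v :=
        List.mem_iff_getElem.2 ⟨j, by simp; omega,
          by rw [List.getElem_set_ne (fun h => hji h.symm)]⟩
      exact gcdL_dvd _ _ hx'
  · -- gcdL s divides every element of the set-list
    refine dvd_gcdL _ _ ?_
    intro x hx
    rcases List.mem_iff_getElem.1 hx with ⟨j, hj, rfl⟩
    have hj' : j < s.length := by simpa using hj
    by_cases hji : i = j
    · subst hji
      rw [List.getElem_set_self]
      exact dvd_sub (gcdL_dvd _ _ (List.getElem_mem hi)) (gcdL_dvd _ _ (hb ▸ List.getElem_mem _))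
    · rw [List.getElem_set_ne hji]
      exact gcdL_dvd _ _ (List.getElem_mem _)

-- the loop condition: len(set(l)) == 1 ↔ l is a nonempty constant list
lemma setLen_one_iff (l : List Int) (hne : l ≠ []) :
    (PySem.Set.ofList l).length = 1 ↔ ∃ v, ∀ x ∈ l, x = v := by
  constructor
  · intro h1
    rcases hS : PySem.Set.ofList l with _ | ⟨v, t⟩
    · exfalso
      rcases List.exists_mem_of_ne_nil l hne with ⟨x, hx⟩
      have : x ∈ PySem.Set.ofList l := (PySem.Set.mem_ofList _ _).2 hx
      simp [hS] at this
    · have ht : t = [] := by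
        have := h1; rw [hS] at this; simpa using this
      subst ht
      refine ⟨v, fun x hx => ?_⟩
      have : x ∈ PySem.Set.ofList l := (PySem.Set.mem_ofList _ _).2 hx
      simpa [hS] using this
  · rintro ⟨v, hv⟩
    have hnd : (PySem.Set.ofList l).Nodup := PySem.Set.nodup_ofList l
    rcases hS : PySem.Set.ofList l with _ | ⟨a, t⟩
    · exfalso
      rcases List.exists_mem_of_ne_nil l hne with ⟨x, hx⟩
      have : x ∈ PySem.Set.ofList l := (PySem.Set.mem_ofList _ _).2 hx
      simp [hS] at this
    · have ha : a = v := hv a ((PySem.Set.mem_ofList _ _).1 (by simp [hS]))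
      have ht : t = [] := by
        rcases t with _ | ⟨y, t'⟩
        · rfl
        · exfalso
          have hy : y = v := hv y ((PySem.Set.mem_ofList _ _).1 (by simp [hS]))
          rw [hS] at hnd
          simp [ha, hy] at hnd
      simp [ht]

lemma sum_const_of_all_eq (l : List Int) (v : Int) (h : ∀ x ∈ l, x = v) :
    l.sum = (l.length : Int) * v := by
  induction l with
  | nil => simp
  | cons x t ih =>
    have hx : x = v := h x (by simp)
    have := ih (fun y hy => h y (List.mem_cons_of_mem _ hy))
    simp [hx, this]
    ring

-- ===== A-side: the loop computes len * gcd =====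
lemma solutionLoop_eq (fuel : Nat) :
    ∀ l : List Int, l ≠ [] → (∀ x ∈ l, 0 < x) → l.sum ≤ (fuel : Int) →
      solutionLoop fuel l = (l.length : Int) * gcdL l := by
  induction fuel with
  | zero =>
    intro l hne hpos hsum
    exfalso
    have : 0 < l.sum := List.sum_pos l hpos hne
    omega
  | succ f ih =>
    intro l hne hpos hsum
    by_cases hone : (PySem.Set.ofList l).length = 1
    · rcases (setLen_one_iff l hne).1 hone with ⟨v, hv⟩
      have hvpos : 0 < v := by
        rcases List.exists_mem_of_ne_nil l hne with ⟨x, hx⟩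
        have := hpos x hx; rwa [hv x hx] at this
      have hg : gcdL l = v := by
        refine Int.dvd_antisymm (gcdL_nonneg l) (le_of_lt hvpos) ?_ ?_
        · rcases List.exists_mem_of_ne_nil l hne with ⟨x, hx⟩
          have := gcdL_dvd l x hx; rwa [hv x hx] at this
        · exact dvd_gcdL l v (fun x hx => (hv x hx) ▸ dvd_refl v)
      rw [solutionLoop, if_pos hone, hg, sum_const_of_all_eq l v hv]
    · -- loop body
      set s := PySem.List.sorted l (fun x => x) false with hs
      have hperm : s.Perm l := PySem.List.sorted_perm l (fun x => x) false
      have hsne : s ≠ [] := by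
        intro h; rw [h] at hperm; exact hne hperm.symm.eq_nil
      have hspos : ∀ x ∈ s, 0 < x := fun x hx => hpos x (hperm.mem_iff.1 hx)
      rcases hm : PySem.List.max? s (fun x => x) with _ | m
      · exact absurd ((PySem.List.max?_eq_none_iff _ _).1 hm) hsne
      have hmmem : m ∈ s := PySem.List.max?_mem hm
      have hmax : ∀ y ∈ s, y ≤ m := PySem.List.max?_isMax hm
      rcases hidx : PySem.List.index? s m with _ | i
      · exact absurd ((PySem.List.index?_eq_none_iff _ _).1 hidx) (by simpa using hmmem)
      rcases PySem.List.getElem_of_index?_eq_some hidx with ⟨hilt, hsi, hfirst⟩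
      -- i ≥ 1 : if the first max were at index 0, the sorted list would be constant
      have hi1 : 1 ≤ i := by
        by_contra h0
        have hi0 : i = 0 := by omega
        subst hi0
        have hall : ∀ x ∈ s, x = m := by
          intro x hx
          rcases List.mem_iff_getElem.1 hx with ⟨j, hj, rfl⟩
          have hle : s[0] ≤ s[j] := PySem.List.sorted_id_getElem_mono l (Nat.zero_le j) (by simpa [hs] using hj)
          have : s[j] ≤ m := hmax _ (List.getElem_mem _)
          omega
        exact hone ((setLen_one_iff l hne).2 ⟨m, fun x hx => hall x (hperm.mem_iff.2 hx)⟩)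
      have hprev : i - 1 < s.length := by omega
      set b := s[i - 1]'hprev with hbdef
      -- b < m and 0 < b
      have hblt : b < m := by
        have hle : s[i - 1]'hprev ≤ s[i]'hilt :=
          PySem.List.sorted_id_getElem_mono l (by omega) (by simpa [hs] using hilt)
        have hbne : b ≠ m := hfirst (i - 1) (by omega)
        rw [hsi] at hle
        omega
      have hbpos : 0 < b := hspos _ (List.getElem_mem hprev)
      -- evaluate the indexing in the port
      have hget1 : PySem.List.pyGet? s (i : Int) = some m := by
        rw [PySem.List.pyGet?_natCast]
        simp [List.getElem?_eq_getElem hilt, hsi]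
      have hcast : ((i : Int) - 1) = ((i - 1 : Nat) : Int) := by omega
      have hget2 : PySem.List.pyGet? s ((i : Int) - 1) = some b := by
        rw [hcast, PySem.List.pyGet?_natCast]
        simp [List.getElem?_eq_getElem hprev, hbdef]
      -- the new list
      set l' := s.set i (m - b) with hl'
      have hl'len : l'.length = l.length := by
        simp [hl', hperm.length_eq]
      have hl'ne : l' ≠ [] := by
        intro h
        have := hl'len; rw [h] at this
        exact hne (List.eq_nil_of_length_eq_zero (by simpa using this.symm))
      have hl'pos : ∀ x ∈ l', 0 < x := by
        intro x hx
        rcases List.mem_or_eq_of_mem_set hx with hx | rfl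
        · exact hspos x hx
        · omega
      have hl'sum : l'.sum = l.sum - b := by
        have := List.sum_set' s i (m - b)
        rw [← hl'] at this
        rw [this, dif_pos hilt, hsi, ← hperm.sum_eq]
        ring
      have hl'g : gcdL l' = gcdL l := by
        have h1 : gcdL l' = gcdL s := by
          have := gcdL_set_sub s i hilt hi1
          rw [hsi] at this
          simpa [hl', hbdef] using this
        rw [h1]
        exact gcdL_congr s l (fun x => hperm.mem_iff)
      -- one unfolding of the loop
      rw [solutionLoop]
      rw [if_neg hone]
      simp only [← hs, hm, hidx, hget1, hget2]
      rw [ih l' hl'ne hl'pos (by rw [hl'sum]; omega), hl'len, hl'g]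

-- ===== B-side: the Euclid fold computes the gcd =====
lemma euclid_gcd_aux : ∀ (n : Nat) (g x : Int), x.natAbs ≤ n → 0 ≤ g → 0 ≤ x →
    euclid g x = (Int.gcd g x : Int) := by
  intro n
  induction n with
  | zero =>
    intro g x hn hg hx
    have hx0 : x = 0 := by omega
    subst hx0
    rw [euclid]
    simp [Int.gcd, Int.natAbs_of_nonneg hg]
  | succ n ih =>
    intro g x hn hg hx
    by_cases hx0 : x = 0
    · subst hx0
      rw [euclid]
      simp [Int.gcd, Int.natAbs_of_nonneg hg]
    · have hxpos : 0 < x := lt_of_le_of_ne hx (Ne.symm hx0)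
      rw [euclid, dif_neg hx0]
      rw [PySem.Int.mod_eq_emod_of_pos hxpos]
      have hmnn : 0 ≤ g % x := Int.emod_nonneg g hx0
      have hmlt : (g % x).natAbs < x.natAbs := by
        have := Int.emod_lt_of_pos g hxpos
        omega
      rw [ih x (g % x) (by omega) hx hmnn]
      congr 1
      -- Int.gcd x (g % x) = Int.gcd g x, via Nat.gcd_rec on the nonneg values
      have hgn : g = ((g.toNat : Int)) := (Int.toNat_of_nonneg hg).symm
      have hxn : x = ((x.toNat : Int)) := (Int.toNat_of_nonneg hx).symm
      have hmod : ((g.toNat : Int)) % ((x.toNat : Int)) = ((g.toNat % x.toNat : Nat) : Int) := by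
        norm_cast
      rw [hgn, hxn, hmod]
      simp only [Int.gcd_natCast_natCast]
      rw [Nat.gcd_comm x.toNat (g.toNat % x.toNat), ← Nat.gcd_rec]
      exact Nat.gcd_comm _ _

lemma euclid_eq_gcd (g x : Int) (hg : 0 ≤ g) (hx : 0 ≤ x) : euclid g x = (Int.gcd g x : Int) :=
  euclid_gcd_aux x.natAbs g x le_rfl hg hx

lemma foldl_euclid_gcd (l : List Int) : ∀ g : Int, 0 ≤ g → (∀ x ∈ l, 0 ≤ x) →
    List.foldl (fun g x => euclid g x) g l = (Int.gcd g (gcdL l) : Int) := by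
  induction l with
  | nil =>
    intro g hg _
    simp [gcdL, Int.gcd, Int.natAbs_of_nonneg hg]
  | cons y t ih =>
    intro g hg hpos
    have hy : 0 ≤ y := hpos y (by simp)
    simp only [List.foldl_cons]
    rw [euclid_eq_gcd g y hg hy]
    rw [ih _ (by positivity) (fun x hx => hpos x (List.mem_cons_of_mem _ hx))]
    have : gcdL (y :: t) = (Int.gcd y (gcdL t) : Int) := rfl
    rw [this]
    simp only [Int.gcd]
    congr 1
    simp [Int.natAbs_natCast]
    exact Nat.gcd_assoc _ _ _
-- constant-list case of the fold (covers non-positive constants too)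
lemma euclid_zero (v : Int) : euclid 0 v = v := by
  by_cases hv : v = 0
  · subst hv; rw [euclid]; simp
  · rw [euclid, dif_neg hv]
    have : PySem.Int.mod 0 v = 0 := (PySem.Int.mod_eq_zero_iff_dvd 0 v).2 (dvd_zero v)
    rw [this, euclid]
    simp

lemma euclid_self (v : Int) : euclid v v = v := by
  by_cases hv : v = 0
  · subst hv; rw [euclid]; simp
  · rw [euclid, dif_neg hv]
    have : PySem.Int.mod v v = 0 := (PySem.Int.mod_eq_zero_iff_dvd v v).2 dvd_rfl
    rw [this, euclid]
    simp

lemma foldl_euclid_const (t : List Int) (v : Int) (h : ∀ x ∈ t, x = v) :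
    List.foldl (fun g x => euclid g x) v t = v := by
  induction t with
  | nil => rfl
  | cons y s ih =>
    have hy : y = v := h y (by simp)
    simp only [List.foldl_cons, hy, euclid_self]
    exact ih (fun x hx => h x (List.mem_cons_of_mem _ hx))

-- ===== VERDICT (by name: the statement is the Claim_ definition above) =====
theorem solution_spec : Claim_equal_solution := by
  unfold Claim_equal_solution
  intro l _ hpre
  rcases hpre with ⟨hne, hcase | hconst⟩
  · -- all-positive case: both sides are len * gcd
    unfold Spec_solution solution solution_alt
    have hsum0 : 0 < l.sum := List.sum_pos l hcase hne
    have hfuel : l.sum ≤ ((l.sum.toNat + 1 : Nat) : Int) := by omega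
    rw [solutionLoop_eq (l.sum.toNat + 1) l hne hcase hfuel]
    rw [foldl_euclid_gcd l 0 le_rfl (fun x hx => le_of_lt (hcase x hx))]
    congr 1
    simp [Int.gcd, Int.natAbs_of_nonneg (gcdL_nonneg l)]
  · -- constant-list case: A exits at once with sum = len * v; B's fold is v
    set v := l.headD 0 with hv
    unfold Spec_solution solution solution_alt
    have hone : (PySem.Set.ofList l).length = 1 :=
      (setLen_one_iff l hne).2 ⟨v, hconst⟩
    rw [solutionLoop, if_pos hone]
    rcases l with _ | ⟨x, t⟩
    · exact absurd rfl hne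
    · have hx : x = v := hconst x (by simp)
      simp only [List.foldl_cons]
      rw [hx, euclid_zero, foldl_euclid_const t v (fun y hy => hconst y (List.mem_cons_of_mem _ hy))]
      exact sum_const_of_all_eq _ v hconst
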